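-- pv_equiv track=rewrite | github.com/stoneleap-david/video-download | server/extractor.py | _pick_text_format
-- ===== SOURCE A (Python) =====
-- def _pick_text_format(formats: list) -> dict | None:
--     """Pick the best text-based subtitle format, skip XML/danmaku."""
--     text_fmts = [f for f in formats if f.get("ext") not in ("xml",)]
--     if not text_fmts:
--         return None
--     for ext in ("json3", "vtt", "srt", "srv1", "srv2", "srv3", "ass"):
--         match = next((f for f in text_fmts if f.get("ext") == ext), None)
--         if match:
--             return match
--     return text_fmts[0]
-- ===== SOURCE B (Python) =====
-- def _pick_text_format(formats: list) -> dict | None: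
--     """Pick the best text-based subtitle format, skip XML/danmaku."""
--     priority = {"json3": 0, "vtt": 1, "srt": 2, "srv1": 3, "srv2": 4, "srv3": 5, "ass": 6}
--     best, best_rank = None, 8
--     for f in formats:
--         ext = f.get("ext")
--         if ext == "xml":
--             continue
--         rank = priority.get(ext, 7)
--         if rank < best_rank:
--             best, best_rank = f, rank
--     return best
-- ===== Notes on version B (the rewrite author's own statement) =====
-- stated objective: alternative
-- what changed: Replaces A's three stages (filter out xml, seven successive next() scans over the filtered list, explicit text_fmts[0] fallback) by a single pass keeping a running minimum: each format is ranked by a priority map (unknown ext = rank 7) and the first format of lowest rank wins, so the fallback case is just rank 7 and no filtered list or per-extension scan exists.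
import Mathlib
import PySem

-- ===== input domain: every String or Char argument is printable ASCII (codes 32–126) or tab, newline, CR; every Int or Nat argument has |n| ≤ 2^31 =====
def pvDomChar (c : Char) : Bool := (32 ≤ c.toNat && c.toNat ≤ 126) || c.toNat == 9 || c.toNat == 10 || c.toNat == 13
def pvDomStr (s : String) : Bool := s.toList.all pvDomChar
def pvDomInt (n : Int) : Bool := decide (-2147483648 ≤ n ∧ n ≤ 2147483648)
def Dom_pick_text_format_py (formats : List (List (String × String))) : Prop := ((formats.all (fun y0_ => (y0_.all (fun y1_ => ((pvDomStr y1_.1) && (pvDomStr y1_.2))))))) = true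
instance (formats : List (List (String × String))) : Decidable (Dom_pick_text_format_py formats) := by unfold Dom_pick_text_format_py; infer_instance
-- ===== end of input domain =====

-- B replaces A's filter + seven priority scans + fallback with ONE pass keeping a running minimum
-- by priority rank (unknown ext = rank 7, xml skipped); same return value everywhere (alternative).

-- f.get("ext"): first-match lookup in the association list (Python dict .get)
def pvGetExt (f : List (String × String)) : Option String :=
  (f.find? (fun p => p.1 == "ext")).map (·.2)

-- ===== PORT A =====
-- the for-loop over the priority tuple: next((f for f in text_fmts if f.get("ext") == ext), None); if match: return match
def pvScanA (text_fmts : List (List (String × String))) : List String → Option (List (String × String))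
  | [] => none
  | ext :: rest =>
    match text_fmts.find? (fun f => pvGetExt f == some ext) with
    | some f => if f.isEmpty then pvScanA text_fmts rest else some f  -- 'if match:' dict truthiness
    | none => pvScanA text_fmts rest

def pick_text_format_py (formats : List (List (String × String))) : Option (List (String × String)) :=
  let text_fmts := formats.filter (fun f => !(pvGetExt f == some "xml"))
  if text_fmts.isEmpty then none
  else
    match pvScanA text_fmts ["json3", "vtt", "srt", "srv1", "srv2", "srv3", "ass"] with
    | some f => some f
    | none => PySem.List.pyGet? text_fmts 0   -- text_fmts[0]; list is nonempty here

-- ===== PORT B =====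
-- priority = {"json3": 0, ..., "ass": 6}
def pvPriority : List (String × Int) :=
  [("json3", 0), ("vtt", 1), ("srt", 2), ("srv1", 3), ("srv2", 4), ("srv3", 5), ("ass", 6)]

-- rank = priority.get(ext, 7); ext may be None (no "ext" key), then 7
def pvRankB (f : List (String × String)) : Int :=
  match pvGetExt f with
  | some e => ((pvPriority.find? (fun p => p.1 == e)).map (·.2)).getD 7
  | none => 7

-- best, best_rank = None, 8; for f in formats: skip xml; if rank < best_rank: best, best_rank = f, rank
def pick_text_format_py_alt (formats : List (List (String × String))) : Option (List (String × String)) :=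
  (formats.foldl
    (fun st f =>
      if pvGetExt f == some "xml" then st
      else if pvRankB f < st.2 then (some f, pvRankB f) else st)
    ((none : Option (List (String × String))), (8 : Int))).1

-- ===== PRECONDITION & SPEC =====
def Spec_pick_text_format_py (formats : List (List (String × String))) (out : Option (List (String × String))) : Prop := out = pick_text_format_py_alt formats
instance (formats : List (List (String × String))) (out : Option (List (String × String))) : Decidable (Spec_pick_text_format_py formats out) := by unfold Spec_pick_text_format_py; infer_instance

-- ===== CLAIM (what is proved, stated in full; the proofs are below) =====
def Claim_equal_pick_text_format_py : Prop := ∀ (formats : List (List (String × String))), Dom_pick_text_format_py formats → Spec_pick_text_format_py formats (pick_text_format_py formats)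

-- ===== LEMMAS AND PROOFS =====

-- rank of an ext within a priority list es: index of first match, else es.length
def pvRankIn : List String → Option String → Int
  | [], _ => 0
  | e :: es, o => if o == some e then 0 else 1 + pvRankIn es o

-- min-first: the first element of minimal rank, with its rank (right recursion, ties to the left)
def pvMF (rk : List (String × String) → Int) :
    List (List (String × String)) → Option (List (String × String) × Int)
  | [] => none
  | f :: fs =>
    match pvMF rk fs with
    | none => some (f, rk f)
    | some (g, rg) => if rk f ≤ rg then some (f, rk f) else some (g, rg)

theorem rankB_eq (f : List (String × String)) :
    pvRankB f = pvRankIn ["json3", "vtt", "srt", "srv1", "srv2", "srv3", "ass"] (pvGetExt f) := by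
  unfold pvRankB
  cases h : pvGetExt f with
  | none => decide
  | some s =>
    by_cases h1 : s = "json3"; · simp [pvPriority, pvRankIn, h1]
    by_cases h2 : s = "vtt"; · simp [pvPriority, pvRankIn, h2]
    by_cases h3 : s = "srt"; · simp [pvPriority, pvRankIn, h3]
    by_cases h4 : s = "srv1"; · simp [pvPriority, pvRankIn, h4]
    by_cases h5 : s = "srv2"; · simp [pvPriority, pvRankIn, h5]
    by_cases h6 : s = "srv3"; · simp [pvPriority, pvRankIn, h6]
    by_cases h7 : s = "ass"; · simp [pvPriority, pvRankIn, h7]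
    have hf : pvPriority.find? (fun p => p.1 == s) = none := by
      rw [List.find?_eq_none]
      intro x hx
      simp only [pvPriority, List.mem_cons, List.not_mem_nil, or_false] at hx
      rcases hx with rfl|rfl|rfl|rfl|rfl|rfl|rfl <;> intro hb <;>
        first
          | exact h1 (eq_of_beq hb).symm
          | exact h2 (eq_of_beq hb).symm
          | exact h3 (eq_of_beq hb).symm
          | exact h4 (eq_of_beq hb).symm
          | exact h5 (eq_of_beq hb).symm
          | exact h6 (eq_of_beq hb).symm
          | exact h7 (eq_of_beq hb).symm
    simp [hf, pvRankIn, h1, h2, h3, h4, h5, h6, h7]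

theorem rankIn_nonneg (es : List String) (o : Option String) : 0 ≤ pvRankIn es o := by
  induction es with
  | nil => exact Int.le_refl 0
  | cons e es ih => unfold pvRankIn; split <;> omega

theorem rankIn_le (es : List String) (o : Option String) : pvRankIn es o ≤ (es.length : Int) := by
  induction es with
  | nil => exact Int.le_refl 0
  | cons e es ih =>
    unfold pvRankIn
    simp only [List.length_cons]
    split <;> push_cast <;> omega

theorem mf_mem (rk : List (String × String) → Int) (fs : List (List (String × String)))
    (g : List (String × String)) (rg : Int) (h : pvMF rk fs = some (g, rg)) :
    g ∈ fs ∧ rg = rk g := by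
  induction fs generalizing g rg with
  | nil => simp [pvMF] at h
  | cons f fs ih =>
    cases hm : pvMF rk fs with
    | none =>
      simp only [pvMF, hm, Option.some.injEq, Prod.mk.injEq] at h
      obtain ⟨h1, h2⟩ := h
      subst h1
      exact ⟨List.mem_cons_self, h2.symm⟩
    | some p =>
      obtain ⟨g', rg'⟩ := p
      simp only [pvMF, hm] at h
      by_cases hle : rk f ≤ rg'
      · rw [if_pos hle] at h
        simp only [Option.some.injEq, Prod.mk.injEq] at h
        obtain ⟨h1, h2⟩ := h
        subst h1
        exact ⟨List.mem_cons_self, h2.symm⟩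
      · rw [if_neg hle] at h
        simp only [Option.some.injEq, Prod.mk.injEq] at h
        obtain ⟨h1, h2⟩ := h
        subst h1; subst h2
        obtain ⟨m1, m2⟩ := ih _ _ hm
        exact ⟨List.mem_cons_of_mem _ m1, m2⟩

-- the running minimum fold, characterised by pvMF
theorem fold_char (rk : List (String × String) → Int) (fs : List (List (String × String)))
    (b : Option (List (String × String))) (r : Int) :
    fs.foldl (fun st f => if rk f < st.2 then (some f, rk f) else st) (b, r)
      = (match pvMF rk fs with
         | none => (b, r)
         | some (g, rg) => if rg < r then (some g, rg) else (b, r)) := by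
  induction fs generalizing b r with
  | nil => simp [pvMF]
  | cons f fs ih =>
    simp only [List.foldl_cons]
    by_cases hf : rk f < r
    · rw [show ((if rk f < (b, r).2 then (some f, rk f) else (b, r))) = (some f, rk f) from if_pos hf]
      rw [ih]
      cases hm : pvMF rk fs with
      | none => simp [pvMF, hm, hf]
      | some p =>
        obtain ⟨g', rg'⟩ := p
        simp only [pvMF, hm]
        by_cases hle : rk f ≤ rg'
        · simp only [if_pos hle]
          rw [if_neg (by omega), if_pos hf]
        · simp only [if_neg hle]
          rw [if_pos (by omega), if_pos (by omega)]
    · rw [show ((if rk f < (b, r).2 then (some f, rk f) else (b, r))) = (b, r) from if_neg hf]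
      rw [ih]
      cases hm : pvMF rk fs with
      | none => simp [pvMF, hm, hf]
      | some p =>
        obtain ⟨g', rg'⟩ := p
        simp only [pvMF, hm]
        by_cases hle : rk f ≤ rg'
        · simp only [if_pos hle]
          rw [if_neg (by omega), if_neg (by omega)]
        · simp only [if_neg hle]

theorem getExt_ne_empty {f : List (String × String)} {v : String}
    (h : pvGetExt f = some v) : f.isEmpty = false := by
  cases f with
  | nil => simp [pvGetExt] at h
  | cons _ _ => rfl

-- pvMF with rank over (e :: es): either the first format with ext e, or pvMF over es shifted by 1
theorem mf_cons_ext (e : String) (es : List String) (fs : List (List (String × String))) :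
    pvMF (fun f => pvRankIn (e :: es) (pvGetExt f)) fs
      = (match fs.find? (fun f => pvGetExt f == some e) with
         | some f => some (f, 0)
         | none => (pvMF (fun f => pvRankIn es (pvGetExt f)) fs).map (fun p => (p.1, 1 + p.2))) := by
  induction fs with
  | nil => simp [pvMF]
  | cons f fs ih =>
    simp only [pvMF, ih, List.find?_cons]
    cases he : pvGetExt f == some e with
    | true =>
      have h0 : pvRankIn (e :: es) (pvGetExt f) = 0 := by simp [pvRankIn, he]
      cases hfind : fs.find? (fun f => pvGetExt f == some e) with
      | some g => simp [h0]
      | none =>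
        cases hm : pvMF (fun f => pvRankIn es (pvGetExt f)) fs with
        | none => simp [h0]
        | some p =>
          obtain ⟨g, rg⟩ := p
          have hnn := rankIn_nonneg es (pvGetExt g)
          have hr := (mf_mem _ _ _ _ hm).2
          simp only [Option.map_some, h0]
          rw [if_pos (by omega)]
    | false =>
      have h1 : pvRankIn (e :: es) (pvGetExt f) = 1 + pvRankIn es (pvGetExt f) := by
        simp [pvRankIn, he]
      cases hfind : fs.find? (fun f' => pvGetExt f' == some e) with
      | some g =>
        simp only [h1]
        rw [if_neg (by have := rankIn_nonneg es (pvGetExt f); omega)]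
      | none =>
        cases hm : pvMF (fun f => pvRankIn es (pvGetExt f)) fs with
        | none => simp [h1]
        | some p =>
          obtain ⟨g, rg⟩ := p
          simp only [Option.map_some, h1]
          by_cases hle : pvRankIn es (pvGetExt f) ≤ rg
          · rw [if_pos (by omega), if_pos hle]; rfl
          · rw [if_neg (by omega), if_neg hle]; rfl

-- A's priority scan, characterised by pvMF
theorem scanA_char (es : List String) (fs : List (List (String × String))) :
    pvScanA fs es
      = (match pvMF (fun f => pvRankIn es (pvGetExt f)) fs with
         | none => none
         | some (g, rg) => if rg < (es.length : Int) then some g else none) := by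
  induction es with
  | nil =>
    cases hm : pvMF (fun f => pvRankIn [] (pvGetExt f)) fs with
    | none => simp [pvScanA]
    | some p =>
      obtain ⟨g, rg⟩ := p
      have h0 : rg = 0 := by simpa [pvRankIn] using (mf_mem _ _ _ _ hm).2
      simp [pvScanA, h0]
  | cons e es ih =>
    simp only [pvScanA, mf_cons_ext]
    cases hfind : fs.find? (fun f => pvGetExt f == some e) with
    | some f =>
      have hp := List.find?_some hfind
      have hext : pvGetExt f = some e := by simpa using hp
      simp only [getExt_ne_empty hext, Bool.false_eq_true, if_false, List.length_cons]
      rw [if_pos (by push_cast; omega)]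
    | none =>
      simp only [ih]
      cases hm : pvMF (fun f => pvRankIn es (pvGetExt f)) fs with
      | none => rfl
      | some p =>
        obtain ⟨g, rg⟩ := p
        simp only [Option.map_some, List.length_cons]
        by_cases h : rg < (es.length : Int)
        · rw [if_pos h, if_pos (by push_cast; omega)]
        · rw [if_neg h, if_neg (by push_cast; omega)]

-- if the head's rank is ≤ the min, the head is the winner
theorem mf_head (rk : List (String × String) → Int) (f : List (String × String))
    (fs : List (List (String × String))) (g : List (String × String)) (rg : Int)
    (h : pvMF rk (f :: fs) = some (g, rg)) (hle : rk f ≤ rg) : g = f := by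
  cases hm : pvMF rk fs with
  | none =>
    simp only [pvMF, hm, Option.some.injEq, Prod.mk.injEq] at h
    exact h.1.symm
  | some p =>
    obtain ⟨g', rg'⟩ := p
    simp only [pvMF, hm] at h
    by_cases hl : rk f ≤ rg'
    · rw [if_pos hl] at h
      simp only [Option.some.injEq, Prod.mk.injEq] at h
      exact h.1.symm
    · rw [if_neg hl] at h
      simp only [Option.some.injEq, Prod.mk.injEq] at h
      obtain ⟨h1, h2⟩ := h
      omega

-- B's guarded fold over formats equals the plain fold over the xml-filtered list
theorem foldB_filter (fs : List (List (String × String)))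
    (st : Option (List (String × String)) × Int) :
    fs.foldl (fun st f =>
        if pvGetExt f == some "xml" then st
        else if pvRankB f < st.2 then (some f, pvRankB f) else st) st
      = (fs.filter (fun f => !(pvGetExt f == some "xml"))).foldl
          (fun st f => if pvRankB f < st.2 then (some f, pvRankB f) else st) st := by
  induction fs generalizing st with
  | nil => rfl
  | cons f fs ih =>
    simp only [List.foldl_cons, List.filter_cons]
    cases h : pvGetExt f == some "xml" with
    | true =>
      simp only [reduceIte, Bool.not_true, Bool.false_eq_true]
      exact ih st
    | false =>
      simp only [reduceIte, Bool.not_false, Bool.false_eq_true, List.foldl_cons]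
      exact ih _

-- ===== VERDICT (by name: the statement is the Claim_ definition above) =====
theorem pick_text_format_py_spec : Claim_equal_pick_text_format_py := by
  intro formats _
  unfold Spec_pick_text_format_py pick_text_format_py pick_text_format_py_alt
  rw [foldB_filter]
  have hrk : pvRankB = fun f => pvRankIn ["json3", "vtt", "srt", "srv1", "srv2", "srv3", "ass"] (pvGetExt f) :=
    funext rankB_eq
  rw [hrk, fold_char]
  cases htf : formats.filter (fun f => !(pvGetExt f == some "xml")) with
  | nil => simp [pvMF]
  | cons f0 tf' =>
    simp only [List.isEmpty_cons, Bool.false_eq_true, if_false]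
    rw [scanA_char]
    cases hm : pvMF (fun f => pvRankIn ["json3", "vtt", "srt", "srv1", "srv2", "srv3", "ass"] (pvGetExt f)) (f0 :: tf') with
    | none =>
      exfalso
      simp only [pvMF] at hm
      split at hm
      · simp at hm
      · split at hm <;> simp at hm
    | some p =>
      obtain ⟨g, rg⟩ := p
      have hr := (mf_mem _ _ _ _ hm).2
      have hg7 : pvRankIn ["json3", "vtt", "srt", "srv1", "srv2", "srv3", "ass"] (pvGetExt g) ≤ 7 := by
        have := rankIn_le ["json3", "vtt", "srt", "srv1", "srv2", "srv3", "ass"] (pvGetExt g)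
        norm_num at this
        exact this
      by_cases h7 : rg < 7
      · simp only [List.length_cons, List.length_nil]
        rw [if_pos (by push_cast; omega), if_pos (by omega)]
      · have hf0 : pvRankIn ["json3", "vtt", "srt", "srv1", "srv2", "srv3", "ass"] (pvGetExt f0) ≤ rg := by
          have := rankIn_le ["json3", "vtt", "srt", "srv1", "srv2", "srv3", "ass"] (pvGetExt f0)
          norm_num at this
          omega
        have hg := mf_head _ _ _ _ _ hm hf0
        subst hg
        simp only [List.length_cons, List.length_nil]
        rw [if_neg (by push_cast; omega), if_pos (by omega)]
        simp [PySem.List.pyGet?, PySem.List.pyIdx?]
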